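-- pv_equiv track=rewrite | github.com/catlee/adventofcode | 2018/python/2.py | process_box_id
-- ===== SOURCE A (Python) =====
-- from collections import defaultdict
--
-- def process_box_id(s):
--     d = defaultdict(int)
--     for c in s:
--         d[c] += 1
--
--     twos = 0
--     threes = 0
--     for v in d.values():
--         if v == 2:
--             twos = 1
--         elif v == 3:
--             threes = 1
--
--     return twos, threes
-- ===== SOURCE B (Python) =====
-- def process_box_id(s):
--     # sort-and-scan: run lengths of consecutive equal chars in the sorted string
--     t = sorted(s)
--     n = len(t)
--     lengths = set()
--     i = 0
--     while i < n:
--         j = i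
--         while j < n and t[j] == t[i]:
--             j += 1
--         lengths.add(j - i)
--         i = j
--     return int(2 in lengths), int(3 in lengths)
-- ===== Notes on version B (the rewrite author's own statement) =====
-- stated objective: alternative
-- what changed: Replaces the dict-counting pass plus scan over dict values by sorting the string and collecting run lengths of consecutive equal characters into a set.
import Mathlib
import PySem

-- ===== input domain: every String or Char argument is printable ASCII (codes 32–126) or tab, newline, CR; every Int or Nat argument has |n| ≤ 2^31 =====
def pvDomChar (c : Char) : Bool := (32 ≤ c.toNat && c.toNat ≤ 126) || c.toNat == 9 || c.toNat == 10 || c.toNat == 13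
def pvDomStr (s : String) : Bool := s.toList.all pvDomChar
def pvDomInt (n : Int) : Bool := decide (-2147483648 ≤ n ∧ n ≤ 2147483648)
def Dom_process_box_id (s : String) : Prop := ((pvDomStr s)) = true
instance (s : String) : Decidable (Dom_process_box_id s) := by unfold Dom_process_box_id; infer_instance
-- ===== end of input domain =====

-- B replaces A's dict-counting pass by a sort-and-scan over run lengths of equal characters (alternative algorithm, similar cost).


-- ===== PORT A =====
def process_box_id (s : String) : Int × Int :=
  let d : PySem.Dict Char Int :=
    s.toList.foldl (fun d c => d.modify c 0 (· + 1)) PySem.Dict.empty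
  let p : Int × Int :=
    d.values.foldl (fun p v =>
      if v = 2 then (1, p.2)
      else if v = 3 then (p.1, 1)
      else p) (0, 0)
  (p.1, p.2)

-- ===== PORT B =====
-- the inner/outer while scan of Source B, as structural recursion: c is t[i], k = j - i so far
def pvRunsAux (c : Char) (k : Int) : List Char → PySem.Set Int → PySem.Set Int
  | [], acc => PySem.Set.add acc k
  | d :: rest, acc =>
    if d = c then pvRunsAux c (k + 1) rest acc
    else pvRunsAux d 1 rest (PySem.Set.add acc k)

def process_box_id_alt (s : String) : Int × Int :=
  let t := PySem.List.sorted s.toList (fun c => c) false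
  let lengths : PySem.Set Int :=
    match t with
    | [] => PySem.Set.empty
    | c :: rest => pvRunsAux c 1 rest PySem.Set.empty
  ((if PySem.Set.contains lengths 2 then 1 else 0),
   (if PySem.Set.contains lengths 3 then 1 else 0))

-- ===== PRECONDITION & SPEC =====
def Spec_process_box_id (s : String) (out : Int × Int) : Prop := out = process_box_id_alt s
instance (s : String) (out : Int × Int) : Decidable (Spec_process_box_id s out) := by unfold Spec_process_box_id; infer_instance

-- ===== CLAIM (what is proved, stated in full; the proofs are below) =====
def Claim_equal_process_box_id : Prop := ∀ (s : String), Dom_process_box_id s → Spec_process_box_id s (process_box_id s)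

-- ===== LEMMAS AND PROOFS =====

-- A's value loop: first component becomes 1 iff some value is 2, second iff some value is 3
theorem pvFoldA (vs : List Int) (t th : Int) :
    vs.foldl (fun p v => if v = 2 then (1, p.2) else if v = 3 then (p.1, 1) else p) (t, th)
      = ((if (2 : Int) ∈ vs then 1 else t), (if (3 : Int) ∈ vs then 1 else th)) := by
  induction vs generalizing t th with
  | nil => simp
  | cons v r ih =>
    simp only [List.foldl_cons, List.mem_cons]
    by_cases h2 : v = 2
    · subst h2; simp [ih]
    · by_cases h3 : v = 3
      · subst h3; simp [ih]
      · rw [if_neg h2, if_neg h3, ih]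
        simp [Ne.symm h2, Ne.symm h3]

-- B's scan: membership in the run-length set, for a sorted tail all ≥ c
theorem pvRunsAux_mem (rest : List Char) (c : Char) (k m : Int) (acc : PySem.Set Int)
    (hs : rest.Pairwise (· ≤ ·)) (hge : ∀ d ∈ rest, c ≤ d) :
    m ∈ pvRunsAux c k rest acc ↔
      m ∈ acc ∨ m = k + rest.count c ∨ ∃ d ∈ rest, d ≠ c ∧ m = rest.count d := by
  induction rest generalizing c k acc with
  | nil => simp [pvRunsAux, PySem.Set.mem_add, or_comm]
  | cons d r ih =>
    rcases List.pairwise_cons.mp hs with ⟨hdr, hr⟩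
    by_cases hdc : d = c
    · subst hdc
      rw [pvRunsAux, if_pos rfl, ih _ _ _ hr hdr]
      constructor
      · rintro (h | h | ⟨e, he, hec, hm⟩)
        · exact Or.inl h
        · refine Or.inr (Or.inl ?_)
          simp [h]; ring
        · exact Or.inr (Or.inr ⟨e, List.mem_cons_of_mem _ he,
            hec, by simp [Ne.symm hec, hm]⟩)
      · rintro (h | h | ⟨e, he, hec, hm⟩)
        · exact Or.inl h
        · refine Or.inr (Or.inl ?_)
          rw [h]; simp; ring
        · rcases List.mem_cons.mp he with rfl | he'
          · exact absurd rfl hec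
          · exact Or.inr (Or.inr ⟨e, he', hec, by
              simpa [Ne.symm hec] using hm⟩)
    · have hcd : c < d := lt_of_le_of_ne (hge d (List.mem_cons_self)) (fun h => hdc h.symm)
      have hcr : c ∉ d :: r := by
        intro hmem
        rcases List.mem_cons.mp hmem with rfl | h
        · exact absurd rfl hdc
        · exact absurd (hdr c h) (not_le.mpr hcd)
      rw [pvRunsAux, if_neg hdc, ih d 1 (PySem.Set.add acc k) hr hdr]
      rw [PySem.Set.mem_add]
      have hc0 : (d :: r).count c = 0 := List.count_eq_zero.mpr hcr
      constructor
      · rintro ((h | h) | h | ⟨e, he, hed, hm⟩)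
        · exact Or.inl h
        · exact Or.inr (Or.inl (by simp [hc0, h]))
        · exact Or.inr (Or.inr ⟨d, List.mem_cons_self, hdc, by
            simp at h ⊢; omega⟩)
        · have hec : e ≠ c := fun h => hcr (h ▸ List.mem_cons_of_mem d he)
          exact Or.inr (Or.inr ⟨e, List.mem_cons_of_mem _ he, hec, by
            have hed' : ¬ (d = e) := fun h => hed h.symm
            simpa [hed'] using hm⟩)
      · rintro (h | h | ⟨e, he, hec, hm⟩)
        · exact Or.inl (Or.inl h)
        · exact Or.inl (Or.inr (by simpa [hc0] using h))
        · rcases List.mem_cons.mp he with rfl | he'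
          · exact Or.inr (Or.inl (by simp at hm ⊢; omega))
          · by_cases hed : e = d
            · subst hed
              refine Or.inr (Or.inl ?_)
              simp only [List.count_cons_self] at hm
              omega
            · exact Or.inr (Or.inr ⟨e, he', hed, by
                have hde : ¬ (d = e) := fun h => hed h.symm
                simpa [hde] using hm⟩)

-- membership in B's run-length set = some character count, over the original char list
theorem pvLengths_mem (l : List Char) (m : Int) :
    (m ∈ (match PySem.List.sorted l (fun c => c) false with
          | [] => (PySem.Set.empty : PySem.Set Int)
          | c :: rest => pvRunsAux c 1 rest PySem.Set.empty)) ↔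
      ∃ c ∈ l, (l.count c : Int) = m := by
  have hperm : (PySem.List.sorted l (fun c => c) false).Perm l := PySem.List.sorted_perm l _ _
  have hpw : (PySem.List.sorted l (fun c => c) false).Pairwise (· ≤ ·) := by
    simpa using PySem.List.sorted_pairwise (key := fun c : Char => c) (xs := l)
  rcases ht : PySem.List.sorted l (fun c => c) false with _ | ⟨c, rest⟩
  · have hl : l = [] := by
      rw [ht] at hperm
      exact hperm.symm.eq_nil
    subst hl
    simp [PySem.Set.empty]
  · rw [ht] at hperm hpw
    rcases List.pairwise_cons.mp hpw with ⟨hcr, hr⟩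
    rw [pvRunsAux_mem rest c 1 m PySem.Set.empty hr hcr]
    have hcount : ∀ e : Char, l.count e = (c :: rest).count e := fun e => (hperm.count_eq e).symm
    have hmem : ∀ e : Char, e ∈ l ↔ e ∈ c :: rest := fun e => ⟨fun h => hperm.symm.mem_iff.mp h, fun h => hperm.mem_iff.mp h⟩
    constructor
    · rintro (h | h | ⟨d, hd, hdc, hm⟩)
      · simp [PySem.Set.empty] at h
      · exact ⟨c, (hmem c).mpr List.mem_cons_self, by
          rw [hcount c]; simp at h ⊢; omega⟩
      · exact ⟨d, (hmem d).mpr (List.mem_cons_of_mem _ hd), by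
          rw [hcount d]
          have : ¬ (c = d) := fun h => hdc h.symm
          simp [this]; omega⟩
    · rintro ⟨e, he, hm⟩
      rw [hcount e] at hm
      by_cases hec : e = c
      · subst hec
        refine Or.inr (Or.inl ?_)
        simp at hm ⊢; omega
      · refine Or.inr (Or.inr ⟨e, ?_, hec, ?_⟩)
        · rcases List.mem_cons.mp ((hmem e).mp he) with rfl | h
          · exact absurd rfl hec
          · exact h
        · have : ¬ (c = e) := fun h => hec h.symm
          simp [this] at hm ⊢; omega

-- A's result in terms of character counts
theorem pvA_eq (s : String) :
    process_box_id s =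
      ((if ∃ c ∈ s.toList, (s.toList.count c : Int) = 2 then 1 else 0),
       (if ∃ c ∈ s.toList, (s.toList.count c : Int) = 3 then 1 else 0)) := by
  have hv : (PySem.Dict.counter s.toList).values
      = (PySem.Set.ofList s.toList).map (fun k => (s.toList.count k : Int)) := by
    have := PySem.Dict.items_counter (xs := s.toList)
    simp only [PySem.Dict.values, this, List.map_map]
    rfl
  simp only [process_box_id]
  rw [← PySem.Dict.counter_eq_foldl, hv, pvFoldA]
  have key : ∀ m : Int,
      ((m ∈ (PySem.Set.ofList s.toList).map (fun k => (s.toList.count k : Int))) ↔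
        ∃ c ∈ s.toList, (s.toList.count c : Int) = m) := by
    intro m
    simp only [List.mem_map, PySem.Set.mem_ofList]
  rw [if_congr (key 2) rfl rfl, if_congr (key 3) rfl rfl]

-- ===== VERDICT (by name: the statement is the Claim_ definition above) =====
theorem process_box_id_spec : Claim_equal_process_box_id := by
  intro s _
  unfold Spec_process_box_id
  rw [pvA_eq]
  simp only [process_box_id_alt]
  have hc : ∀ m : Int,
      ((PySem.Set.contains (match PySem.List.sorted s.toList (fun c => c) false with
          | [] => (PySem.Set.empty : PySem.Set Int)
          | c :: rest => pvRunsAux c 1 rest PySem.Set.empty) m = true) ↔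
        ∃ c ∈ s.toList, (s.toList.count c : Int) = m) := by
    intro m
    rw [PySem.Set.contains_iff]
    exact pvLengths_mem s.toList m
  rw [if_congr (hc 2) rfl rfl, if_congr (hc 3) rfl rfl]
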